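-- pv_equiv track=rewrite | github.com/pypi-data/pypi-mirror-178 | packages/formgram/formgram-0.0.6-py3-none-any.whl/formgram/machines/pushdown_automata/grammar_interface.py | create_possible_right_hand_side_tails
-- ===== SOURCE A (Python) =====
-- from itertools import product
-- from typing import Collection, Iterator, Tuple, Dict
--
-- def nonterminal(source_state: str, stack_head: str, target_state: str) -> str:
--     """Create a new nonterminal based on template
--
--     Using this function guarantees that for any triple of
--     source_state, stack_head and target_state
--     the resulting new nonterminal string is identical and unique compared to every
--     other triple.
--
--     :param source_state:
--     :param stack_head:
--     :param target_state:
--     :return: a new nonterminal string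
--     """
--     return f"[{source_state}, {stack_head}, {target_state}]"
--
-- def create_possible_right_hand_side_tails(stack_push, states, first_state, last_state) -> Iterator[tuple]:
--     """Generate all possible sate sequences which start with first_state, end with last_state and are of same length as stack_push
--
--     :param stack_push:
--     :param states:
--     :param first_state:
--     :param last_state:
--     :return: Iterator yielding sequences from first_state to last_state as tuple
--     """
--     if not stack_push:
--         return  # stop iteration
--
--     if len(stack_push) == 1:
--         yield tuple([nonterminal(first_state, stack_push[0], last_state)])
--         return
--
--     possible_state_sequences = product(states, repeat=len(stack_push) - 1)
--     for sequence in possible_state_sequences: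
--         head = (nonterminal(first_state, stack_push[0], sequence[0]),)
--         middle = tuple(nonterminal(sequence[i], stack_push[i+1], sequence[i+1]) for i in range(0, len(sequence) - 1))
--         tail = (nonterminal(sequence[-1], stack_push[-1], last_state),)
--         yield head + tuple(middle) + tail
-- ===== SOURCE B (Python) =====
-- def nonterminal(source_state: str, stack_head: str, target_state: str) -> str:
--     return f"[{source_state}, {stack_head}, {target_state}]"
--
--
-- def create_possible_right_hand_side_tails(stack_push, states, first_state, last_state):
--     """Enumerate the sequences as paths: a recursive DFS over the stack symbols,
--     choosing the next intermediate state at each step (states in natural order,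
--     so the emission order matches the original)."""
--     if not stack_push:
--         return
--
--     def dfs(cur, syms):
--         head, rest = syms[0], syms[1:]
--         if not rest:
--             yield (nonterminal(cur, head, last_state),)
--         else:
--             for s in states:
--                 for tail in dfs(s, rest):
--                     yield (nonterminal(cur, head, s),) + tail
--
--     yield from dfs(first_state, stack_push)
-- ===== Notes on version B (the rewrite author's own statement) =====
-- stated objective: alternative
-- what changed: Replaces itertools.product over intermediate-state tuples plus head/middle/tail index arithmetic with a recursive DFS that walks the stack symbols, threading the current source state and emitting each nonterminal chain directly.
import Mathlib
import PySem

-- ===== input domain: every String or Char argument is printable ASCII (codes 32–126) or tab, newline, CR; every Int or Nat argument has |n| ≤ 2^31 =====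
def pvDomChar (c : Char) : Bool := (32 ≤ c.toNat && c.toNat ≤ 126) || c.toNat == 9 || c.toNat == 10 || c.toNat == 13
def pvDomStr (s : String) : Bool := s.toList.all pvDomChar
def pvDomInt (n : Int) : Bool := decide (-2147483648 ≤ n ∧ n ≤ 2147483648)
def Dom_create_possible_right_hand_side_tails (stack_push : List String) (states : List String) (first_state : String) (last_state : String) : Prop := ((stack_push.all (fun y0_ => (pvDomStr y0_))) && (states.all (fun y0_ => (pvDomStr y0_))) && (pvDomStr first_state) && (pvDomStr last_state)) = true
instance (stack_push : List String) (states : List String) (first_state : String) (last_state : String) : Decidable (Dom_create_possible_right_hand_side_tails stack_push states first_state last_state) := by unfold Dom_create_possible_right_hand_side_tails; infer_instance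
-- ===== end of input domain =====

-- B replaces itertools.product plus head/middle/tail index arithmetic with a recursive
-- path-enumerating DFS over the stack symbols (objective: alternative decomposition).

-- ===== PORT A =====
-- nonterminal helper (f-string concatenation)
def pvNonterminal (source_state stack_head target_state : String) : String :=
  "[" ++ source_state ++ ", " ++ stack_head ++ ", " ++ target_state ++ "]"

-- itertools.product(states, repeat=n), first coordinate varying slowest
def pvProduct (states : List String) : Nat → List (List String)
  | 0 => [[]]
  | n + 1 => states.flatMap (fun s => (pvProduct states n).map (fun seq => s :: seq))

-- the body of A's for-loop: head + middle + tail, with the same index arithmetic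
def pvAssemble (stack_push : List String) (first_state last_state : String)
    (seq : List String) : List String :=
  [pvNonterminal first_state (stack_push.getD 0 "") (seq.getD 0 "")]
  ++ (List.range (seq.length - 1)).map (fun i =>
        pvNonterminal (seq.getD i "") (stack_push.getD (i + 1) "") (seq.getD (i + 1) ""))
  ++ [pvNonterminal (seq.getD (seq.length - 1) "") (stack_push.getD (stack_push.length - 1) "") last_state]

def create_possible_right_hand_side_tails (stack_push : List String) (states : List String) (first_state : String) (last_state : String) : List (List String) :=
  if stack_push = [] then []
  else if stack_push.length = 1 then
    [[pvNonterminal first_state (stack_push.getD 0 "") last_state]]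
  else
    (pvProduct states (stack_push.length - 1)).map
      (pvAssemble stack_push first_state last_state)

-- ===== PORT B =====
-- dfs cur syms: walk the remaining stack symbols, choosing each intermediate state
def pvDfs (states : List String) (last_state : String) : String → List String → List (List String)
  | _, [] => []
  | cur, [sym] => [[pvNonterminal cur sym last_state]]
  | cur, sym :: sym2 :: rest =>
      states.flatMap (fun s =>
        (pvDfs states last_state s (sym2 :: rest)).map (fun tail => pvNonterminal cur sym s :: tail))

def create_possible_right_hand_side_tails_alt (stack_push : List String) (states : List String) (first_state : String) (last_state : String) : List (List String) :=
  if stack_push = [] then []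
  else pvDfs states last_state first_state stack_push

-- ===== PRECONDITION & SPEC =====
def Spec_create_possible_right_hand_side_tails (stack_push : List String) (states : List String) (first_state : String) (last_state : String) (out : List (List String)) : Prop := out = create_possible_right_hand_side_tails_alt stack_push states first_state last_state
instance (stack_push : List String) (states : List String) (first_state : String) (last_state : String) (out : List (List String)) : Decidable (Spec_create_possible_right_hand_side_tails stack_push states first_state last_state out) := by unfold Spec_create_possible_right_hand_side_tails; infer_instance

-- ===== CLAIM (what is proved, stated in full; the proofs are below) =====
def Claim_equal_create_possible_right_hand_side_tails : Prop := ∀ (stack_push : List String) (states : List String) (first_state : String) (last_state : String), Dom_create_possible_right_hand_side_tails stack_push states first_state last_state → Spec_create_possible_right_hand_side_tails stack_push states first_state last_state (create_possible_right_hand_side_tails stack_push states first_state last_state)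

-- ===== LEMMAS AND PROOFS =====

-- clean chain builder: reference form both sides are reduced to
def pvBuild (last_state : String) : String → List String → List String → List String
  | cur, [sym], _ => [pvNonterminal cur sym last_state]
  | cur, sym :: sym2 :: rest, s :: ss => pvNonterminal cur sym s :: pvBuild last_state s (sym2 :: rest) ss
  | _, _, _ => []

theorem mem_pvProduct_length (states : List String) (n : Nat) (seq : List String)
    (h : seq ∈ pvProduct states n) : seq.length = n := by
  induction n generalizing seq with
  | zero => simp [pvProduct] at h; simp [h]
  | succ n ih =>
    simp [pvProduct] at h
    obtain ⟨s, _, t, ht, rfl⟩ := h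
    simp [ih t ht]

theorem dfs_eq_build (states : List String) (last_state : String) :
    ∀ (xs : List String) (x cur : String),
      pvDfs states last_state cur (x :: xs)
        = (pvProduct states xs.length).map (pvBuild last_state cur (x :: xs)) := by
  intro xs
  induction xs with
  | nil => intro x cur; simp [pvDfs, pvProduct, pvBuild]
  | cons y ys ih =>
    intro x cur
    simp only [pvDfs, pvProduct, List.length_cons, List.map_flatMap, List.map_map]
    congr 1
    funext s
    rw [ih y s]
    simp only [List.map_map]
    rfl

theorem assemble_eq_build (last_state : String) :
    ∀ (seq : List String) (xs : List String) (x cur : String),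
      seq.length = xs.length → seq ≠ [] →
      pvAssemble (x :: xs) cur last_state seq = pvBuild last_state cur (x :: xs) seq := by
  intro seq
  induction seq with
  | nil => intro _ _ _ h hne; exact absurd rfl hne
  | cons s ss ih =>
    intro xs x cur hlen _
    cases xs with
    | nil => simp at hlen
    | cons y ys =>
      cases ss with
      | nil =>
        cases ys with
        | nil => simp [pvAssemble, pvBuild]
        | cons _ _ => simp at hlen
      | cons s2 ss2 =>
        cases ys with
        | nil => simp at hlen
        | cons y2 ys2 =>
          have hlen' : (s2 :: ss2).length = (y2 :: ys2).length := by
            simpa using hlen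
          have hih := ih (y2 :: ys2) y s hlen' (by simp)
          have step : pvBuild last_state cur (x :: y :: y2 :: ys2) (s :: s2 :: ss2)
              = pvNonterminal cur x s :: pvBuild last_state s (y :: y2 :: ys2) (s2 :: ss2) := rfl
          rw [step, ← hih]
          simp only [pvAssemble, List.range_succ_eq_map, List.map_map, Function.comp_def,
            List.map_cons, List.length_cons, List.getD, List.getElem?_cons_succ,
            List.getElem?_cons_zero, Nat.add_sub_cancel, Option.getD_some, List.cons_append,
            List.nil_append]

-- ===== VERDICT (by name: the statement is the Claim_ definition above) =====
theorem create_possible_right_hand_side_tails_spec : Claim_equal_create_possible_right_hand_side_tails := by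
  intro stack_push states first_state last_state _
  unfold Spec_create_possible_right_hand_side_tails
  unfold create_possible_right_hand_side_tails create_possible_right_hand_side_tails_alt
  match stack_push with
  | [] => simp
  | [x] => simp [pvDfs]
  | x :: y :: ys =>
    simp only [List.length_cons, if_neg (by simp : ¬(x :: y :: ys) = ([] : List String))]
    rw [dfs_eq_build]
    refine List.map_congr_left ?_
    intro seq hseq
    have hl := mem_pvProduct_length states _ seq hseq
    have : seq.length = (y :: ys).length := by simpa using hl
    exact assemble_eq_build last_state seq (y :: ys) x first_state this
      (by cases seq <;> simp_all)
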